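-- pv_equiv track=rewrite | github.com/pypi-data/pypi-mirror-352 | packages/pyplaid/pyplaid-0.1.2.tar.gz/pyplaid-0.1.2/docs/fix_module.py | find_blocks
-- ===== SOURCE A (Python) =====
-- def find_blocks(lines: list[str]) -> list[list[str]]:
--     blocks = [[]]
--     for line in lines:
--         if line == "\n":
--             blocks.append([])
--         else:
--             blocks[-1].append(line)
--     return blocks
-- ===== SOURCE B (Python) =====
-- def find_blocks(lines: list[str]) -> list[list[str]]:
--     seps = [i for i, line in enumerate(lines) if line == "\n"]
--     blocks = []
--     prev = 0
--     for i in seps: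
--         blocks.append(lines[prev:i])
--         prev = i + 1
--     blocks.append(lines[prev:])
--     return blocks
-- ===== Notes on version B (the rewrite author's own statement) =====
-- stated objective: alternative
-- what changed: Replaces the single pass that mutates the last block per line by a two-pass scheme: first collect the indices of blank-line separators, then build every block by slicing the input between consecutive separators.
import Mathlib
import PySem

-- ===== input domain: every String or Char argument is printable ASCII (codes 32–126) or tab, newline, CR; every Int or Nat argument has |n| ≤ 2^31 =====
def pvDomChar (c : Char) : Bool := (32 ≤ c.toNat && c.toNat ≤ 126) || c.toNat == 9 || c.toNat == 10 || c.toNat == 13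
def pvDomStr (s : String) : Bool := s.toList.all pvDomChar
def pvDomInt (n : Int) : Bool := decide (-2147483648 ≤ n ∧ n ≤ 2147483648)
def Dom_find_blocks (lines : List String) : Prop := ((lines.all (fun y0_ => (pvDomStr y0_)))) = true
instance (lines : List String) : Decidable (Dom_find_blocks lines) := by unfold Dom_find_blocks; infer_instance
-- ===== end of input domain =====

-- B replaces A's single pass that mutates the last block with a two-pass scheme
-- (collect separator indices, then slice between them); objective: alternative.

-- ===== PORT A =====
-- blocks[-1].append(line): replace the last element of a nonempty list (A's blocks list is never empty)
def pvAppendLast : List (List String) → String → List (List String)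
  | [], _ => []
  | [b], l => [b ++ [l]]
  | b :: bs, l => b :: pvAppendLast bs l

def find_blocks (lines : List String) : List (List String) :=
  lines.foldl (fun blocks line => if line = "\n" then blocks ++ [[]] else pvAppendLast blocks line) [[]]

-- ===== PORT B =====
-- one step of B's 'for i in seps' loop: state = (blocks, prev)
def pvSliceStep (xs : List String) (s : List (List String) × Int) (i : Int) : List (List String) × Int :=
  (s.1 ++ [PySem.List.slice xs (some s.2) (some i)], i + 1)

def find_blocks_alt (lines : List String) : List (List String) :=
  let seps : List Int := ((PySem.List.enumerate lines 0).filter (fun p => p.2 == "\n")).map (fun p => p.1)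
  let s := seps.foldl (pvSliceStep lines) ([], 0)
  s.1 ++ [PySem.List.slice lines (some s.2) none]

-- ===== PRECONDITION & SPEC =====
def Spec_find_blocks (lines : List String) (out : List (List String)) : Prop := out = find_blocks_alt lines
instance (lines : List String) (out : List (List String)) : Decidable (Spec_find_blocks lines out) := by unfold Spec_find_blocks; infer_instance

-- ===== CLAIM (what is proved, stated in full; the proofs are below) =====
def Claim_equal_find_blocks : Prop := ∀ (lines : List String), Dom_find_blocks lines → Spec_find_blocks lines (find_blocks lines)

-- ===== LEMMAS AND PROOFS =====

-- reference function both ports are proved equal to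
def blocksOf : List String → List (List String)
  | [] => [[]]
  | l :: rest =>
      if l = "\n" then [] :: blocksOf rest
      else match blocksOf rest with
           | [] => [[l]]
           | b :: bs => (l :: b) :: bs

def pvCombine (b : List String) : List (List String) → List (List String)
  | [] => [b]
  | c :: cs => (b ++ c) :: cs

theorem blocksOf_ne_nil (xs : List String) : blocksOf xs ≠ [] := by
  cases xs with
  | nil => simp [blocksOf]
  | cons l rest =>
      simp only [blocksOf]
      split
      · simp
      · cases h : blocksOf rest <;> simp

theorem pvAppendLast_append (bs : List (List String)) (b : List String) (l : String) :
    pvAppendLast (bs ++ [b]) l = bs ++ [b ++ [l]] := by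
  induction bs with
  | nil => rfl
  | cons x bs ih =>
      cases bs with
      | nil => rfl
      | cons y t => simpa [pvAppendLast] using ih

theorem A_gen (lines : List String) :
    ∀ (bs : List (List String)) (b : List String),
      lines.foldl (fun blocks line => if line = "\n" then blocks ++ [[]] else pvAppendLast blocks line) (bs ++ [b])
        = bs ++ pvCombine b (blocksOf lines) := by
  induction lines with
  | nil => intro bs b; simp [blocksOf, pvCombine]
  | cons l rest ih =>
      intro bs b
      by_cases hl : l = "\n"
      · simp only [List.foldl_cons]
        rw [if_pos hl, ih (bs ++ [b]) []]
        obtain ⟨c, cs, hc⟩ : ∃ c cs, blocksOf rest = c :: cs := by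
          cases h : blocksOf rest with
          | nil => exact absurd h (blocksOf_ne_nil rest)
          | cons c cs => exact ⟨c, cs, rfl⟩
        simp [blocksOf, hl, hc, pvCombine]
  
      · simp only [List.foldl_cons]
        rw [if_neg hl, pvAppendLast_append, ih bs (b ++ [l])]
        obtain ⟨c, cs, hc⟩ : ∃ c cs, blocksOf rest = c :: cs := by
          cases h : blocksOf rest with
          | nil => exact absurd h (blocksOf_ne_nil rest)
          | cons c cs => exact ⟨c, cs, rfl⟩
        simp [blocksOf, hl, hc, pvCombine]

theorem find_blocks_eq_blocksOf (lines : List String) : find_blocks lines = blocksOf lines := by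
  have h := A_gen lines [] []
  obtain ⟨c, cs, hc⟩ : ∃ c cs, blocksOf lines = c :: cs := by
    cases h' : blocksOf lines with
    | nil => exact absurd h' (blocksOf_ne_nil lines)
    | cons c cs => exact ⟨c, cs, rfl⟩
  simpa [find_blocks, hc, pvCombine] using h

-- B-side: the separator positions as naturals, structurally
def sepsN : List String → List Nat
  | [] => []
  | l :: rest => if l = "\n" then 0 :: (sepsN rest).map (· + 1) else (sepsN rest).map (· + 1)

def endOf : List Nat → Nat → Nat
  | [], p => p
  | i :: ss, _ => endOf ss (i + 1)

def core (xs : List String) (ss : List Nat) (p : Nat) : List (List String) × Int :=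
  (ss.map (fun k => ((k : Nat) : Int))).foldl (pvSliceStep xs) ([], ((p : Nat) : Int))

theorem enumerate_shift (xs : List String) :
    ∀ s : Int, PySem.List.enumerate xs (s + 1) = (PySem.List.enumerate xs s).map (fun p => (p.1 + 1, p.2)) := by
  induction xs with
  | nil => intro s; simp [PySem.List.enumerate_nil]
  | cons x xs ih => intro s; simp [PySem.List.enumerate_cons, ih (s + 1)]

theorem seps_eq (xs : List String) :
    ((PySem.List.enumerate xs 0).filter (fun p => p.2 == "\n")).map (fun p => p.1)
      = (sepsN xs).map (fun k => ((k : Nat) : Int)) := by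
  induction xs with
  | nil => simp [PySem.List.enumerate_nil, sepsN]
  | cons l rest ih =>
      have he : PySem.List.enumerate (l :: rest) 0
          = (0, l) :: (PySem.List.enumerate rest 0).map (fun p => (p.1 + 1, p.2)) := by
        rw [PySem.List.enumerate_cons]
        congr 1
        have h := enumerate_shift rest 0
        norm_num at h
        exact h
      have key := congrArg (List.map (fun x : Int => x + 1)) ih
      simp only [List.map_map, Function.comp_def] at key
      rw [he]
      by_cases hl : l = "\n"
      · simp only [sepsN, if_pos hl, List.filter_cons, List.filter_map, List.map_cons,
          List.map_map, Function.comp_def]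
        simp only [hl]
        rw [if_pos (by simp : ("\n" == "\n") = true), List.map_cons, List.map_map]
        push_cast
        exact congrArg₂ List.cons rfl key
      · simp only [sepsN, if_neg hl, List.filter_cons, List.filter_map, List.map_cons,
          List.map_map, Function.comp_def]
        simp only [show (l == "\n") = false by simpa using hl]
        rw [if_neg (by simp : ¬ (false = true)), List.map_map]
        push_cast
        exact key

theorem foldl_step_acc (xs : List String) :
    ∀ (ss : List Int) (blocks : List (List String)) (p : Int),
      ss.foldl (pvSliceStep xs) (blocks, p)
        = (blocks ++ (ss.foldl (pvSliceStep xs) ([], p)).1, (ss.foldl (pvSliceStep xs) ([], p)).2) := by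
  intro ss
  induction ss with
  | nil => intro blocks p; simp
  | cons i ss ih =>
      intro blocks p
      simp only [List.foldl_cons, pvSliceStep]
      rw [ih (blocks ++ [PySem.List.slice xs (some p) (some i)]) (i + 1),
          ih ([] ++ [PySem.List.slice xs (some p) (some i)]) (i + 1)]
      simp

theorem core_cons (xs : List String) (i : Nat) (ss : List Nat) (p : Nat) :
    core xs (i :: ss) p
      = ([PySem.List.slice xs (some ((p : Nat) : Int)) (some ((i : Nat) : Int))] ++ (core xs ss (i + 1)).1,
         (core xs ss (i + 1)).2) := by
  simp only [core, List.map_cons, List.foldl_cons, pvSliceStep]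
  rw [foldl_step_acc]
  push_cast
  simp

theorem core_snd (xs : List String) :
    ∀ (ss : List Nat) (p : Nat), (core xs ss p).2 = ((endOf ss p : Nat) : Int) := by
  intro ss
  induction ss with
  | nil => intro p; simp [core, endOf]
  | cons i ss ih => intro p; rw [core_cons, endOf, ih]

theorem endOf_map (ss : List Nat) : ∀ p : Nat, endOf (ss.map (· + 1)) (p + 1) = endOf ss p + 1 := by
  induction ss with
  | nil => intro p; simp [endOf]
  | cons i ss ih => intro p; simp only [List.map_cons, endOf]; exact ih (i + 1)

theorem core_shift (l : String) (rest : List String) :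
    ∀ (ss : List Nat) (p : Nat),
      core (l :: rest) (ss.map (· + 1)) (p + 1) = ((core rest ss p).1, (core rest ss p).2 + 1) := by
  intro ss
  induction ss with
  | nil => intro p; simp [core, endOf]
  | cons i ss ih =>
      intro p
      simp only [List.map_cons]
      rw [core_cons, core_cons]
      have hsl : PySem.List.slice (l :: rest) (some (((p + 1 : Nat)) : Int)) (some (((i + 1 : Nat)) : Int))
          = PySem.List.slice rest (some ((p : Nat) : Int)) (some ((i : Nat) : Int)) := by
        rw [PySem.List.slice_natCast, PySem.List.slice_natCast]
        simp [List.drop_succ_cons, Nat.succ_sub_succ]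
      rw [hsl, ih (i + 1)]

theorem alt_eq_core (xs : List String) :
    find_blocks_alt xs
      = (core xs (sepsN xs) 0).1
        ++ [PySem.List.slice xs (some ((endOf (sepsN xs) 0 : Nat) : Int)) none] := by
  simp only [find_blocks_alt, seps_eq]
  have h0 : ((0 : Nat) : Int) = (0 : Int) := by norm_num
  rw [show ((sepsN xs).map (fun k => ((k : Nat) : Int))).foldl (pvSliceStep xs) ([], (0 : Int))
        = core xs (sepsN xs) 0 by simp [core], core_snd]

theorem core_eq_blocksOf (xs : List String) :
    (core xs (sepsN xs) 0).1
      ++ [PySem.List.slice xs (some ((endOf (sepsN xs) 0 : Nat) : Int)) none] = blocksOf xs := by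
  induction xs with
  | nil => simp [core, sepsN, endOf, blocksOf, PySem.List.slice_from_natCast]
  | cons l rest ih =>
      by_cases hl : l = "\n"
      · simp only [sepsN, if_pos hl]
        rw [core_cons]
        have hshift := core_shift l rest (sepsN rest) 0
        norm_num at hshift
        rw [hshift]
        have hend : endOf ((sepsN rest).map (· + 1)) (0 + 1) = endOf (sepsN rest) 0 + 1 :=
          endOf_map (sepsN rest) 0
        simp only [endOf]
        norm_num at hend
        rw [hend]
        have hsl2 : PySem.List.slice (l :: rest) (some (((endOf (sepsN rest) 0 + 1 : Nat)) : Int)) none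
            = PySem.List.slice rest (some ((endOf (sepsN rest) 0 : Nat) : Int)) none := by
          rw [PySem.List.slice_from_natCast, PySem.List.slice_from_natCast]
          simp [List.drop_succ_cons]
        rw [hsl2]
        have h00 : PySem.List.slice (l :: rest) (some ((0 : Nat) : Int)) (some ((0 : Nat) : Int)) = [] := by
          rw [PySem.List.slice_natCast]; simp
        rw [h00]
        simp [blocksOf, hl, ← ih, PySem.List.slice_from_natCast]
      · simp only [sepsN, if_neg hl]
        cases hss : sepsN rest with
        | nil =>
            rw [hss] at ih
            simp only [List.map_nil]
            simp only [core, endOf, List.map_nil, List.foldl_nil] at ih ⊢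
            rw [PySem.List.slice_from_natCast] at ih ⊢
            simp only [Nat.cast_ofNat, List.drop_zero, List.nil_append] at ih ⊢
            simp [blocksOf, hl, ← ih]
        | cons i ss' =>
            rw [hss] at ih
            simp only [List.map_cons]
            rw [core_cons] at ih ⊢
            have hshift := core_shift l rest ss' (i + 1)
            have : (i + 1) + 1 = i + 2 := rfl
            rw [this] at hshift
            rw [hshift]
            simp only [endOf] at ih ⊢
            have hend : endOf (ss'.map (· + 1)) ((i + 1) + 1) = endOf ss' (i + 1) + 1 :=
              endOf_map ss' (i + 1)
            rw [show (i + 1) + 1 = i + 2 from rfl] at hend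
            rw [hend]
            have hsl2 : PySem.List.slice (l :: rest) (some (((endOf ss' (i + 1) + 1 : Nat)) : Int)) none
                = PySem.List.slice rest (some ((endOf ss' (i + 1) : Nat) : Int)) none := by
              rw [PySem.List.slice_from_natCast, PySem.List.slice_from_natCast]
              simp [List.drop_succ_cons]
            rw [hsl2]
            have hsl1 : PySem.List.slice (l :: rest) (some ((0 : Nat) : Int)) (some (((i + 1 : Nat)) : Int))
                = l :: PySem.List.slice rest (some ((0 : Nat) : Int)) (some ((i : Nat) : Int)) := by
              rw [PySem.List.slice_natCast, PySem.List.slice_natCast]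
              simp [List.take_succ_cons]
            rw [hsl1]
            simp only [blocksOf, if_neg hl, ← ih]
            simp

-- ===== VERDICT (by name: the statement is the Claim_ definition above) =====
theorem find_blocks_spec : Claim_equal_find_blocks := by
  intro lines _
  unfold Spec_find_blocks
  rw [find_blocks_eq_blocksOf, alt_eq_core, core_eq_blocksOf]
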